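-- pv_equiv track=rewrite | github.com/timothy-ch-cheung/coding-problems | yahtzee_upper/yahtzee_upper.py | yahtzee_upper_nlogn
-- ===== SOURCE A (Python) =====
-- def yahtzee_upper_nlogn(dice_rolls):
--     dice_rolls = sorted(dice_rolls)
--     previous = None
--     running_total = 0
--     scores = []
--     for roll in dice_rolls:
--         if previous is None:
--             running_total += roll
--         elif roll == previous:
--             running_total += roll
--         else:
--             scores.append(running_total)
--             running_total = roll
--         previous = roll
--     scores.append(running_total)
--     return max(scores)
-- ===== SOURCE B (Python) =====
-- def yahtzee_upper_nlogn(dice_rolls):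
--     counts = {}
--     for v in dice_rolls:
--         counts[v] = counts.get(v, 0) + 1
--     return max((v * c for v, c in counts.items()), default=0)
-- ===== Notes on version B (the rewrite author's own statement) =====
-- stated objective: alternative
-- what changed: Replaces A's sort-then-grouped-accumulation pass (previous/running_total/scores state machine over the sorted list) with a no-sort single counting pass into a dict followed by a maximum of v*count over its items.
import Mathlib
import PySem

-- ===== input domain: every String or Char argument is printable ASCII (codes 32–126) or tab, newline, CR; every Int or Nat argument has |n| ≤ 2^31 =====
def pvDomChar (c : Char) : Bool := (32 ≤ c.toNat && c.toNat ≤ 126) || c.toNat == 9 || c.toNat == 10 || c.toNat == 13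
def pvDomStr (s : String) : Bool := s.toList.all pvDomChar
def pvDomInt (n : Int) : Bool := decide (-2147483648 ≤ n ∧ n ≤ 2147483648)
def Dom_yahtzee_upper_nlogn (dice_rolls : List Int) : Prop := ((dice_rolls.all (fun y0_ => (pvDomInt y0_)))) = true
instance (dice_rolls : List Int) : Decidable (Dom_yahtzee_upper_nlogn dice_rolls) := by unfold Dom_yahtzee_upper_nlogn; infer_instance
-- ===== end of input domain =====

-- B replaces A's sort-then-grouped-accumulation pass with a no-sort counting dict followed by a maximum of v*count(v) over its items (objective: alternative).


-- ===== PORT A =====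
-- one iteration of A's for-loop: state (previous, running_total, scores)
def yahtzeeStep (s : Option Int × Int × List Int) (roll : Int) : Option Int × Int × List Int :=
  match s with
  | (none, rt, sc) => (some roll, rt + roll, sc)
  | (some p, rt, sc) =>
    if roll = p then (some roll, rt + roll, sc)
    else (some roll, roll, sc ++ [rt])

def yahtzee_upper_nlogn (dice_rolls : List Int) : Int :=
  let sortedRolls := PySem.List.sorted dice_rolls (fun x => x) false
  let st := sortedRolls.foldl yahtzeeStep (none, 0, [])
  let scores := st.2.2 ++ [st.2.1]
  -- max(scores): scores ends with the appended running_total, hence is nonempty and max never raises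
  match PySem.List.max? scores (fun x => x) with
  | some m => m
  | none => 0

-- ===== PORT B =====
def yahtzee_upper_nlogn_alt (dice_rolls : List Int) : Int :=
  let counts := dice_rolls.foldl (fun d v => d.insert v (d.getD v 0 + 1))
    (PySem.Dict.empty : PySem.Dict Int Int)
  PySem.List.maxD (counts.items.map (fun p => p.1 * p.2)) (fun x => x) 0

-- ===== PRECONDITION & SPEC =====
def Spec_yahtzee_upper_nlogn (dice_rolls : List Int) (out : Int) : Prop := out = yahtzee_upper_nlogn_alt dice_rolls
instance (dice_rolls : List Int) (out : Int) : Decidable (Spec_yahtzee_upper_nlogn dice_rolls out) := by unfold Spec_yahtzee_upper_nlogn; infer_instance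

-- ===== CLAIM (what is proved, stated in full; the proofs are below) =====
def Claim_equal_yahtzee_upper_nlogn : Prop := ∀ (dice_rolls : List Int), Dom_yahtzee_upper_nlogn dice_rolls → Spec_yahtzee_upper_nlogn dice_rolls (yahtzee_upper_nlogn dice_rolls)

-- ===== LEMMAS AND PROOFS =====

-- running through a run of equal values only adds to running_total
theorem foldl_step_replicate (k : Nat) (v rt : Int) (sc : List Int) :
    (List.replicate k v).foldl yahtzeeStep (some v, rt, sc) = (some v, rt + k * v, sc) := by
  induction k generalizing rt with
  | zero => simp
  | succ n ih =>
    simp only [List.replicate_succ, List.foldl_cons, yahtzeeStep, if_true]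
    rw [ih]
    congr 1
    push_cast
    ring_nf

-- processing the remaining groups appends each group total to scores
theorem foldl_step_groups (l : List Int) (ds : List Int) (p rt : Int) (sc : List Int)
    (hp : ∀ v ∈ ds, p < v) (hs : ds.Pairwise (· < ·)) (hc : ∀ v ∈ ds, 0 < l.count v) :
    let st := (ds.flatMap (fun v => List.replicate (l.count v) v)).foldl yahtzeeStep (some p, rt, sc)
    st.2.2 ++ [st.2.1] = sc ++ [rt] ++ ds.map (fun v => v * (l.count v : Int)) := by
  induction ds generalizing p rt sc with
  | nil => simp
  | cons v t ih =>
    have hpv : p < v := hp v (by simp)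
    have hcv : 0 < l.count v := hc v (by simp)
    obtain ⟨k, hk⟩ : ∃ k, l.count v = k + 1 := ⟨l.count v - 1, by omega⟩
    have hpt : ∀ w ∈ t, v < w := fun w hw => (List.pairwise_cons.mp hs).1 w hw
    have hst : t.Pairwise (· < ·) := (List.pairwise_cons.mp hs).2
    have hct : ∀ w ∈ t, 0 < l.count w := fun w hw => hc w (by simp [hw])
    simp only [List.flatMap_cons, List.foldl_append, hk, List.replicate_succ,
      List.foldl_cons, yahtzeeStep, if_neg (by omega : ¬ v = p)]
    rw [foldl_step_replicate]
    have := ih v (v + (k : Int) * v) (sc ++ [rt]) hpt hst hct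
    simp only at this
    rw [this]
    simp only [List.map_cons, hk]
    have : v + (k : Int) * v = v * ((k : Int) + 1) := by ring
    rw [this]
    push_cast
    simp

-- the group decomposition is a permutation of the original list
theorem count_flatMap_replicate (l : List Int) (ds : List Int) (hnd : ds.Nodup) (a : Int) :
    (ds.flatMap (fun v => List.replicate (l.count v) v)).count a
      = if a ∈ ds then l.count a else 0 := by
  induction ds with
  | nil => simp
  | cons v t ih =>
    have hvt : v ∉ t := (List.nodup_cons.mp hnd).1
    rw [List.flatMap_cons, List.count_append, ih (List.nodup_cons.mp hnd).2]
    by_cases hav : a = v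
    · subst hav
      simp [hvt]
    · simp [List.count_replicate, hav, Ne.symm hav]

theorem grouped_perm (l : List Int) :
    ((PySem.List.sorted (PySem.Set.ofList l) (fun x => x) false).flatMap
      (fun v => List.replicate (l.count v) v)).Perm l := by
  have hnd : (PySem.List.sorted (PySem.Set.ofList l) (fun x => x) false).Nodup :=
    (PySem.List.sorted_perm (PySem.Set.ofList l) (fun x => x) false).nodup_iff.mpr
      (PySem.Set.nodup_ofList l)
  rw [List.perm_iff_count]
  intro a
  rw [count_flatMap_replicate l _ hnd a]
  have hmem : a ∈ PySem.List.sorted (PySem.Set.ofList l) (fun x => x) false ↔ a ∈ l := by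
    rw [PySem.List.mem_sorted, PySem.Set.mem_ofList]
  by_cases h : a ∈ l
  · simp [hmem, h]
  · simp [hmem, h, List.count_eq_zero_of_not_mem h]

theorem grouped_pairwise_le (l : List Int) (ds : List Int) (hs : ds.Pairwise (· < ·)) :
    (ds.flatMap (fun v => List.replicate (l.count v) v)).Pairwise (· ≤ ·) := by
  induction ds with
  | nil => simp
  | cons v t ih =>
    rw [List.flatMap_cons, List.pairwise_append]
    refine ⟨List.pairwise_replicate.mpr (Or.inr le_rfl), ih (List.pairwise_cons.mp hs).2, ?_⟩
    intro a ha b hb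
    obtain ⟨w, hw, hbw⟩ := List.mem_flatMap.mp hb
    rw [List.eq_of_mem_replicate ha, List.eq_of_mem_replicate hbw]
    exact le_of_lt ((List.pairwise_cons.mp hs).1 w hw)

-- the sorted input IS the concatenation of its value groups in increasing order
theorem sorted_eq_grouped (l : List Int) :
    PySem.List.sorted l (fun x => x) false
      = (PySem.List.sorted (PySem.Set.ofList l) (fun x => x) false).flatMap
          (fun v => List.replicate (l.count v) v) := by
  apply PySem.List.sorted_id_eq_of_perm_of_pairwise
  · exact grouped_perm l
  · exact grouped_pairwise_le l _ (PySem.List.sorted_ofList_pairwise_lt l)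

-- max of a nonempty Int list depends only on the multiset of elements
theorem max?_id_perm (xs ys : List Int) (h : xs.Perm ys) :
    PySem.List.max? xs (fun x => x) = PySem.List.max? ys (fun x => x) := by
  cases hx : PySem.List.max? xs (fun x => x) with
  | none =>
    have hxe : xs = [] := (PySem.List.max?_eq_none_iff _ _).mp hx
    subst hxe
    have hye : ys = [] := h.nil_eq.symm
    subst hye
    exact hx.symm
  | some m =>
    cases hy : PySem.List.max? ys (fun x => x) with
    | none =>
      have hye : ys = [] := (PySem.List.max?_eq_none_iff _ _).mp hy
      subst hye
      have hxe : xs = [] := List.Perm.eq_nil h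
      subst hxe
      have hne := (PySem.List.max?_eq_none_iff ([] : List Int) (fun x => x)).mpr rfl
      rw [hne] at hx
      simp at hx
    | some n =>
      have hm := PySem.List.max?_mem hx
      have hn := PySem.List.max?_mem hy
      have h1 : m ≤ n := PySem.List.max?_isMax hy m (h.mem_iff.mp hm)
      have h2 : n ≤ m := PySem.List.max?_isMax hx n (h.mem_iff.mpr hn)
      exact congrArg some (le_antisymm h1 h2)

theorem yahtzee_upper_nlogn_spec : Claim_equal_yahtzee_upper_nlogn := by
  intro l _
  show yahtzee_upper_nlogn l = yahtzee_upper_nlogn_alt l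
  unfold yahtzee_upper_nlogn yahtzee_upper_nlogn_alt
  simp only [sorted_eq_grouped l, PySem.Dict.foldl_insert_getD_add_one_eq_counter,
    PySem.Dict.items_counter, List.map_map, Function.comp_def]
  have hmax : PySem.List.max? ((PySem.List.sorted (PySem.Set.ofList l) (fun x => x) false).map
        (fun v => v * (List.count v l : Int))) (fun x => x)
      = PySem.List.max? ((PySem.Set.ofList l).map (fun v => v * (List.count v l : Int))) (fun x => x) :=
    max?_id_perm _ _ ((PySem.List.sorted_perm _ _ _).map _)
  cases hd : PySem.List.sorted (PySem.Set.ofList l) (fun x => x) false with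
  | nil =>
    have hle : l = [] := by
      have hofl := (PySem.List.sorted_eq_nil_iff (PySem.Set.ofList l) (fun x => x) false).mp hd
      rcases l with _ | ⟨x, t⟩
      · rfl
      · exfalso
        have hx : x ∈ PySem.Set.ofList (x :: t) := (PySem.Set.mem_ofList _ _).mpr (by simp)
        rw [hofl] at hx
        simp at hx
    subst hle
    decide
  | cons v t =>
    rw [hd] at hmax
    have hvl : v ∈ l := by
      have hv : v ∈ PySem.List.sorted (PySem.Set.ofList l) (fun x => x) false := by
        rw [hd]; simp
      rw [PySem.List.mem_sorted, PySem.Set.mem_ofList] at hv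
      exact hv
    have hcv : 0 < l.count v := List.count_pos_iff.mpr hvl
    obtain ⟨k, hk⟩ : ∃ k, l.count v = k + 1 := ⟨l.count v - 1, by omega⟩
    have hps : (v :: t).Pairwise (· < ·) := hd ▸ PySem.List.sorted_ofList_pairwise_lt l
    have hfold :
        (((v :: t).flatMap (fun v => List.replicate (l.count v) v)).foldl
            yahtzeeStep ((none : Option Int), (0 : Int), ([] : List Int))).2.2 ++
          [(((v :: t).flatMap (fun v => List.replicate (l.count v) v)).foldl
            yahtzeeStep ((none : Option Int), (0 : Int), ([] : List Int))).2.1]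
        = (v :: t).map (fun v => v * (l.count v : Int)) := by
      simp only [List.flatMap_cons, List.foldl_append, hk, List.replicate_succ,
        List.foldl_cons, yahtzeeStep]
      rw [foldl_step_replicate]
      have hpt : ∀ w ∈ t, v < w := fun w hw => (List.pairwise_cons.mp hps).1 w hw
      have hG := foldl_step_groups l t v (0 + v + (k : Int) * v) []
        hpt (List.pairwise_cons.mp hps).2
        (fun w hw => List.count_pos_iff.mpr (by
          have hwv : w ∈ PySem.List.sorted (PySem.Set.ofList l) (fun x => x) false := by
            rw [hd]; simp [hw]
          rw [PySem.List.mem_sorted, PySem.Set.mem_ofList] at hwv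
          exact hwv))
      simp only at hG
      rw [hG]
      simp only [List.map_cons, hk]
      have he : (0 : Int) + v + (k : Int) * v = v * ((k : Int) + 1) := by ring
      rw [he]
      push_cast
      simp
    rw [hfold, hmax]
    unfold PySem.List.maxD
    cases hmx : PySem.List.max? ((PySem.Set.ofList l).map (fun v => v * (List.count v l : Int))) (fun x => x) with
    | none =>
      exfalso
      have hofl := (PySem.List.max?_eq_none_iff _ _).mp hmx
      simp only [List.map_eq_nil_iff] at hofl
      have hvm : v ∈ PySem.Set.ofList l := (PySem.Set.mem_ofList _ _).mpr hvl
      rw [hofl] at hvm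
      simp at hvm
    | some m => rfl
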